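-- pv_equiv track=rewrite | github.com/pranaliSawadh/python-practical | practical4/change_case.py | small_case
-- ===== SOURCE A (Python) =====
-- def small_case(text):
-- 		n = ""
-- 		for i in text:
-- 			if ord(i)>=65 and ord(i)<=90:
-- 				num = ord(i)+32
-- 				n = chr(num) + n
-- 			elif ord(i)>=97 and ord(i)<=122:
-- 		 		n = n+i
-- 		return n
-- ===== SOURCE B (Python) =====
-- def small_case(text):
--     uppers = [chr(ord(c) + 32) for c in text if 65 <= ord(c) <= 90]
--     lowers = [c for c in text if 97 <= ord(c) <= 122]
--     return ''.join(reversed(uppers)) + ''.join(lowers)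
-- ===== Notes on version B (the rewrite author's own statement) =====
-- stated objective: simpler
-- what changed: Replaces A's single loop that prepends lowered uppercase letters and appends lowercase letters to one accumulator with two filtered comprehensions joined as reversed(lowered uppers) + lowers.
import Mathlib
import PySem

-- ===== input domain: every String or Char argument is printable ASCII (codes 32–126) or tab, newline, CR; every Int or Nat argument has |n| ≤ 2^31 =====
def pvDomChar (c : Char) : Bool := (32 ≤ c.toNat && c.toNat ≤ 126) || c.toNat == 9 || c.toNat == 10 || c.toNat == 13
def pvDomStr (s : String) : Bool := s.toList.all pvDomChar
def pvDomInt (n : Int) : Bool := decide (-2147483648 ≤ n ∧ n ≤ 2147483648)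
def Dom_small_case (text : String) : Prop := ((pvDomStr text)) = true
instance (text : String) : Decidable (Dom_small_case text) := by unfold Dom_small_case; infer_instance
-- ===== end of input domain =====

-- B is a different decomposition (two filtered passes + explicit reversal) of A's prepend/append loop; return values proved equal.

-- ===== PORT A =====
-- A's loop: n = ""; for i in text: upper → n = chr(ord i+32) + n; lower → n = n + i
def smallCaseLoopA : List Char → List Char → List Char
  | [], n => n
  | i :: rest, n =>
      if 65 ≤ i.toNat ∧ i.toNat ≤ 90 then
        smallCaseLoopA rest (Char.ofNat (i.toNat + 32) :: n)
      else if 97 ≤ i.toNat ∧ i.toNat ≤ 122 then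
        smallCaseLoopA rest (n ++ [i])
      else
        smallCaseLoopA rest n

def small_case (text : String) : String :=
  String.mk (smallCaseLoopA text.toList [])

-- ===== PORT B =====
def small_case_alt (text : String) : String :=
  let uppers := (text.toList.filter (fun c => 65 ≤ c.toNat && c.toNat ≤ 90)).map
      (fun c => Char.ofNat (c.toNat + 32))
  let lowers := text.toList.filter (fun c => 97 ≤ c.toNat && c.toNat ≤ 122)
  String.mk (uppers.reverse ++ lowers)

-- ===== PRECONDITION & SPEC =====
def Spec_small_case (text : String) (out : String) : Prop := out = small_case_alt text
instance (text : String) (out : String) : Decidable (Spec_small_case text out) := by unfold Spec_small_case; infer_instance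

-- ===== CLAIM (what is proved, stated in full; the proofs are below) =====
def Claim_equal_small_case : Prop := ∀ (text : String), Dom_small_case text → Spec_small_case text (small_case text)

-- ===== LEMMAS AND PROOFS =====
-- Invariant of A's loop: with accumulator split as U ++ L (U = lowered uppers so far,
-- reversed; L = lowers so far), the result is (new uppers reversed ++ U) ++ (L ++ new lowers).
theorem smallCaseLoopA_eq (cs : List Char) : ∀ (U L : List Char),
    smallCaseLoopA cs (U ++ L) =
      (((cs.filter (fun c => 65 ≤ c.toNat && c.toNat ≤ 90)).map
          (fun c => Char.ofNat (c.toNat + 32))).reverse ++ U) ++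
        (L ++ cs.filter (fun c => 97 ≤ c.toNat && c.toNat ≤ 122)) := by
  induction cs with
  | nil => intro U L; simp [smallCaseLoopA]
  | cons i rest ih =>
    intro U L
    by_cases hu : 65 ≤ i.toNat ∧ i.toNat ≤ 90
    · have hl : ¬ (97 ≤ i.toNat ∧ i.toNat ≤ 122) := by omega
      have bu : (decide (65 ≤ i.toNat) && decide (i.toNat ≤ 90)) = true := by
        simp [hu.1, hu.2]
      have bl : (decide (97 ≤ i.toNat) && decide (i.toNat ≤ 122)) = false := by
        simp; omega
      have hsplit : Char.ofNat (i.toNat + 32) :: (U ++ L) =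
          (Char.ofNat (i.toNat + 32) :: U) ++ L := by simp
      simp only [smallCaseLoopA, if_pos hu, hsplit, ih]
      simp [List.filter, bu, bl]
    · by_cases hl : 97 ≤ i.toNat ∧ i.toNat ≤ 122
      · have bu : (decide (65 ≤ i.toNat) && decide (i.toNat ≤ 90)) = false := by
          simp; omega
        have bl : (decide (97 ≤ i.toNat) && decide (i.toNat ≤ 122)) = true := by
          simp [hl.1, hl.2]
        have hsplit : (U ++ L) ++ [i] = U ++ (L ++ [i]) := by simp
        simp only [smallCaseLoopA, if_neg hu, if_pos hl, hsplit, ih]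
        simp [List.filter, bu, bl]
      · have bu : (decide (65 ≤ i.toNat) && decide (i.toNat ≤ 90)) = false := by
          simp; omega
        have bl : (decide (97 ≤ i.toNat) && decide (i.toNat ≤ 122)) = false := by
          simp; omega
        simp only [smallCaseLoopA, if_neg hu, if_neg hl, ih]
        simp [List.filter, bu, bl]

-- ===== VERDICT (by name: the statement is the Claim_ definition above) =====
theorem small_case_spec : Claim_equal_small_case := by
  intro text _
  unfold Spec_small_case small_case small_case_alt
  have h := smallCaseLoopA_eq text.toList [] []
  simp at h
  simp [h]
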